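-- pv_equiv track=rewrite | github.com/hoshy001/nets.phasedetection | data/process_pdb.py | replicate_box
-- ===== SOURCE A (Python) =====
-- from typing import List, Optional, Tuple
--
-- def replicate_box(
--                   increment_x: List[int],
--                   increment_y: List[int],
--                   increment_z: List[int]) -> List[List[int]]:
--     """
--     Input an increment array in each direction, e.g.
--     increment_x, y, z = [-1, 0, 1], replicating the box three times in
--     each dimension
--     """
--     replicate_box_vec = []
--     for i in increment_x:
--         for j in increment_y:
--             for k in increment_z:
--                 replicate_box_vec.append([i, j, k])
--     return replicate_box_vec
-- ===== SOURCE B (Python) =====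
-- def replicate_box(increment_x, increment_y, increment_z):
--     """
--     Input an increment array in each direction, e.g.
--     increment_x, y, z = [-1, 0, 1], replicating the box three times in
--     each dimension
--     """
--     result = [[]]
--     for dim in (increment_x, increment_y, increment_z):
--         result = [partial + [v] for partial in result for v in dim]
--     return result
-- ===== Notes on version B (the rewrite author's own statement) =====
-- stated objective: alternative
-- what changed: Replaces the fixed triple nested loop appending [i,j,k] with an iterative fold over the three dimension lists that rebuilds a list of partial rows, extending one coordinate per pass.
import Mathlib
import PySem

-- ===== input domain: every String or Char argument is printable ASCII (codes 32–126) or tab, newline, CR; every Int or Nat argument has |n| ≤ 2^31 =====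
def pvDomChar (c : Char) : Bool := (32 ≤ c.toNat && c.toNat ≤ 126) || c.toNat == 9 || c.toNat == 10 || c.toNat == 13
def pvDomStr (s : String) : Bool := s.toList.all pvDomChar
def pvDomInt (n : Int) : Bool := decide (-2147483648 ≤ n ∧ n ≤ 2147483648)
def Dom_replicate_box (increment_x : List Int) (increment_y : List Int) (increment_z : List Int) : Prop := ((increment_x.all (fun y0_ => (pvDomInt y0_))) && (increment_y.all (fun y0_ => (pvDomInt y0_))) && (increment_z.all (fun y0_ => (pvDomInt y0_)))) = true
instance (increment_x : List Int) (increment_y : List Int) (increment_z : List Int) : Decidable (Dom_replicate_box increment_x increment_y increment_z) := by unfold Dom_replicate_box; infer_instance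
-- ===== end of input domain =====

-- B replaces A's fixed triple nested loop with a fold over the three dimension
-- lists that extends a list of partial rows one coordinate per pass (objective: alternative).

-- ===== PORT A =====
-- triple nested loop appending [i, j, k] to an accumulator
def replicate_box (increment_x : List Int) (increment_y : List Int) (increment_z : List Int) : List (List Int) :=
  increment_x.foldl (fun acc i =>
    increment_y.foldl (fun acc j =>
      increment_z.foldl (fun acc k =>
        acc ++ [[i, j, k]]) acc) acc) []

-- ===== PORT B =====
-- one pass of B's loop: [partial + [v] for partial in result for v in dim]
def pvExtend (result : List (List Int)) (dim : List Int) : List (List Int) :=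
  result.flatMap (fun partial_ => dim.map (fun v => partial_ ++ [v]))

def replicate_box_alt (increment_x : List Int) (increment_y : List Int) (increment_z : List Int) : List (List Int) :=
  [increment_x, increment_y, increment_z].foldl pvExtend [[]]

-- ===== PRECONDITION & SPEC =====
def Spec_replicate_box (increment_x : List Int) (increment_y : List Int) (increment_z : List Int) (out : List (List Int)) : Prop := out = replicate_box_alt increment_x increment_y increment_z
instance (increment_x : List Int) (increment_y : List Int) (increment_z : List Int) (out : List (List Int)) : Decidable (Spec_replicate_box increment_x increment_y increment_z out) := by unfold Spec_replicate_box; infer_instance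

-- ===== CLAIM (what is proved, stated in full; the proofs are below) =====
def Claim_equal_replicate_box : Prop := ∀ (increment_x : List Int) (increment_y : List Int) (increment_z : List Int), Dom_replicate_box increment_x increment_y increment_z → Spec_replicate_box increment_x increment_y increment_z (replicate_box increment_x increment_y increment_z)

-- ===== LEMMAS AND PROOFS =====

-- Each of A's loops has the shape `foldl step acc` with `step a v = a ++ f v`;
-- such a loop appends `l.flatMap f` to its accumulator.
theorem foldl_step_append {α : Type} (step : List (List Int) → α → List (List Int))
    (f : α → List (List Int)) (hstep : ∀ a v, step a v = a ++ f v) :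
    ∀ (l : List α) (acc : List (List Int)), l.foldl step acc = acc ++ l.flatMap f := by
  intro l
  induction l with
  | nil => simp
  | cons h t ih => intro acc; simp [List.foldl, hstep, ih, List.append_assoc]

theorem replicate_box_eq_flatMap (x y z : List Int) :
    replicate_box x y z =
      x.flatMap (fun i => y.flatMap (fun j => z.map (fun k => [i, j, k]))) := by
  unfold replicate_box
  rw [foldl_step_append _ (fun i => y.flatMap (fun j => z.map (fun k => [i, j, k])))
        (fun a i => by
          rw [foldl_step_append _ (fun j => z.map (fun k => [i, j, k]))
                (fun a j => by
                  rw [foldl_step_append _ (fun k => [[i, j, k]]) (fun a k => rfl)]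
                  rw [← List.map_eq_flatMap])])]
  simp

theorem replicate_box_alt_eq_flatMap (x y z : List Int) :
    replicate_box_alt x y z =
      x.flatMap (fun i => y.flatMap (fun j => z.map (fun k => [i, j, k]))) := by
  unfold replicate_box_alt pvExtend
  simp [List.foldl, List.flatMap_map, List.flatMap_assoc]

-- ===== VERDICT (by name: the statement is the Claim_ definition above) =====
theorem replicate_box_spec : Claim_equal_replicate_box := by
  intro x y z _
  unfold Spec_replicate_box
  rw [replicate_box_eq_flatMap, replicate_box_alt_eq_flatMap]
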